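-- pv_equiv track=rewrite | github.com/FelipePaivaVale/trabalhos_facul | kruskal.py | busca_peso
-- ===== SOURCE A (Python) =====
-- from collections import deque
--
-- def busca_peso(grafo, inicio, fim):
--     visitados = set()
--     fila = deque([(inicio, [inicio], 0)])
--
--     while fila:
--         atual, caminho, peso_total = fila.popleft()
--         visitados.add(atual)
--
--         if atual == fim:
--             return caminho, peso_total
--
--         for ver, peso in grafo.get(atual, {}).items():
--             if ver not in visitados:
--                 fila.append((ver, caminho + [ver], peso_total + peso))
--
--     return None, None
-- ===== SOURCE B (Python) =====
-- from collections import deque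
--
-- def busca_peso(grafo, inicio, fim):
--     # BFS marking discovered on enqueue; parent pointers, path rebuilt at the end.
--     parent = {}
--     dist = {inicio: 0}
--     fila = deque([inicio])
--     while fila:
--         atual = fila.popleft()
--         if atual == fim:
--             caminho = []
--             no = fim
--             while no is not None:
--                 caminho.append(no)
--                 no = parent.get(no)
--             caminho.reverse()
--             return caminho, dist[fim]
--         for ver, peso in grafo.get(atual, {}).items():
--             if ver not in dist:
--                 dist[ver] = dist[atual] + peso
--                 parent[ver] = atual
--                 fila.append(ver)
--     return None, None
-- ===== Notes on version B (the rewrite author's own statement) =====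
-- stated objective: alternative
-- what changed: A's BFS stores a full path copy in every queue entry and re-enqueues nodes that are already queued (it only marks visited on dequeue); B marks nodes discovered on enqueue, keeps only parent pointers and distances in dicts, and reconstructs the path once at the end.
import Mathlib
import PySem

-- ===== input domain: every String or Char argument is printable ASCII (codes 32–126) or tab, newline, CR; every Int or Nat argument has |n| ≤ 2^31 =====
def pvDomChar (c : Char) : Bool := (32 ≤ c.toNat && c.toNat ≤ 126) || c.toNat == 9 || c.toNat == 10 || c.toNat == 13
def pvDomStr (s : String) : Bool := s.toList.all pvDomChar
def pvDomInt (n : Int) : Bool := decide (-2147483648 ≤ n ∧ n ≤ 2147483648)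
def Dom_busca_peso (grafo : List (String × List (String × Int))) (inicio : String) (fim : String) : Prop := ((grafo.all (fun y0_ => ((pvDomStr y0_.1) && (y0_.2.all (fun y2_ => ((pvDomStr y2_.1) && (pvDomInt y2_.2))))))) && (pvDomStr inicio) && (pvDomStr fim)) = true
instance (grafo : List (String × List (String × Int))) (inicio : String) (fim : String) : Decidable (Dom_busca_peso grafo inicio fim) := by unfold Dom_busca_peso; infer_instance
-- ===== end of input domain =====

-- B replaces A's BFS that copies the whole path into every queue entry (and re-expands
-- nodes already in the queue) by BFS that marks nodes discovered on enqueue and keeps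
-- parent pointers, rebuilding the path once at the end; objective: alternative.

-- ===== PORT A =====
-- grafo.get(atual, {}) on the association list: first match, default empty
def pvAdj (grafo : List (String × List (String × Int))) (v : String) : List (String × Int) :=
  match grafo.find? (fun p => p.1 == v) with
  | some p => p.2
  | none => []

-- the while-loop of A; fuel is only a totality guard (pvFuelA is proved sufficient below)
def buscaA_loop (grafo : List (String × List (String × Int))) (fim : String) :
    Nat → PySem.Set String → List (String × List String × Int) → Option (List String) × Option Int
  | 0, _, _ => (none, none)
  | _ + 1, _, [] => (none, none)
  | fuel + 1, vis, (atual, caminho, peso) :: rest =>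
    let vis' := PySem.Set.add vis atual
    if atual = fim then (some caminho, some peso)
    else
      buscaA_loop grafo fim fuel vis'
        (rest ++ (pvAdj grafo atual).filterMap (fun vp =>
          if PySem.Set.contains vis' vp.1 then none
          else some (vp.1, caminho ++ [vp.1], peso + vp.2)))

def pvNbrs (grafo : List (String × List (String × Int))) : List String :=
  grafo.flatMap (fun p => p.2.map Prod.fst)

def pvU (grafo : List (String × List (String × Int))) (inicio : String) : List String :=
  inicio :: pvNbrs grafo

def pvK (grafo : List (String × List (String × Int))) : Nat :=
  1 + (grafo.map (fun p => p.2.length)).sum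

def pvN (grafo : List (String × List (String × Int))) (inicio : String) : Nat :=
  (PySem.List.dedup (pvU grafo inicio)).length

def pvFuelA (grafo : List (String × List (String × Int))) (inicio : String) : Nat :=
  (pvN grafo inicio + 1) * (pvK grafo) ^ (pvN grafo inicio + 1) + 1

def busca_peso (grafo : List (String × List (String × Int))) (inicio : String) (fim : String) :
    Option (List String) × Option Int :=
  buscaA_loop grafo fim (pvFuelA grafo inicio) PySem.Set.empty [(inicio, [inicio], 0)]

-- ===== PORT B =====
-- the reconstruction while-loop 'while no is not None: caminho.append(no); no = parent.get(no)';
-- fuel is a totality guard (parent chains are proved acyclic, len(parent)+1 steps suffice)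
def buscaB_recon (par : PySem.Dict String String) : Nat → String → List String
  | 0, _ => []
  | fuel + 1, no =>
    no :: (match par.get? no with
           | some prev => buscaB_recon par fuel prev
           | none => [])

-- the body of B's 'for ver, peso in …: if ver not in dist: …' loop; state = (parent, dist, fila)
def buscaB_step (atual : String)
    (st : PySem.Dict String String × PySem.Dict String Int × List String) (vp : String × Int) :
    PySem.Dict String String × PySem.Dict String Int × List String :=
  if st.2.1.contains vp.1 then st
  else (st.1.insert vp.1 atual, st.2.1.insert vp.1 (st.2.1.getD atual 0 + vp.2), st.2.2 ++ [vp.1])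

-- B's while-loop; fuel is a totality guard (pvFuelB is proved sufficient below)
def buscaB_loop (grafo : List (String × List (String × Int))) (fim : String) :
    Nat → PySem.Dict String String → PySem.Dict String Int → List String →
    Option (List String) × Option Int
  | 0, _, _, _ => (none, none)
  | _ + 1, _, _, [] => (none, none)
  | fuel + 1, par, dist, atual :: rest =>
    if atual = fim then
      (some (buscaB_recon par (par.items.length + 1) fim).reverse, some (dist.getD fim 0))
    else
      let st := (pvAdj grafo atual).foldl (buscaB_step atual) (par, dist, rest)
      buscaB_loop grafo fim fuel st.1 st.2.1 st.2.2

def pvFuelB (grafo : List (String × List (String × Int))) : Nat :=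
  (grafo.map (fun p => p.2.length)).sum + 2

def busca_peso_alt (grafo : List (String × List (String × Int))) (inicio : String) (fim : String) :
    Option (List String) × Option Int :=
  buscaB_loop grafo fim (pvFuelB grafo) PySem.Dict.empty (PySem.Dict.empty.insert inicio 0) [inicio]

-- ===== PRECONDITION & SPEC =====
def Spec_busca_peso (grafo : List (String × List (String × Int))) (inicio : String) (fim : String) (out : Option (List String) × Option Int) : Prop := out = busca_peso_alt grafo inicio fim
instance (grafo : List (String × List (String × Int))) (inicio : String) (fim : String) (out : Option (List String) × Option Int) : Decidable (Spec_busca_peso grafo inicio fim out) := by unfold Spec_busca_peso; infer_instance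

-- ===== CLAIM (what is proved, stated in full; the proofs are below) =====
def Claim_equal_busca_peso : Prop := ∀ (grafo : List (String × List (String × Int))) (inicio : String) (fim : String), Dom_busca_peso grafo inicio fim → Spec_busca_peso grafo inicio fim (busca_peso grafo inicio fim)

-- ===== LEMMAS AND PROOFS =====

-- ---- spec-side: the dedup view of A's queue ----
-- pvF V Q: the sublist of Q keeping, among entries whose node is not in V, the first entry per node
def pvF (V : List String) : List (String × List String × Int) → List (String × List String × Int)
  | [] => []
  | e :: Q => if e.1 ∈ V then pvF V Q else e :: pvF (e.1 :: V) Q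

-- pvG p w W l: the queue entries created from adjacency list l at a node with path p, weight w,
-- keeping only children not yet discovered (not in W), deduplicating left to right
def pvG (p : List String) (w : Int) (W : List String) : List (String × Int) → List (String × List String × Int)
  | [] => []
  | (c, pw) :: l => if c ∈ W then pvG p w W l else (c, p ++ [c], w + pw) :: pvG p w (c :: W) l

lemma pvF_cons (V : List String) (e : String × List String × Int) (Q : List (String × List String × Int)) :
    pvF V (e :: Q) = if e.1 ∈ V then pvF V Q else e :: pvF (e.1 :: V) Q := rfl

lemma pvG_cons (p : List String) (w : Int) (W : List String) (c : String) (pw : Int) (l : List (String × Int)) :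
    pvG p w W ((c, pw) :: l) = if c ∈ W then pvG p w W l else (c, p ++ [c], w + pw) :: pvG p w (c :: W) l := rfl

lemma pvF_congr {V V' : List String} (h : ∀ x, x ∈ V ↔ x ∈ V') :
    ∀ Q, pvF V Q = pvF V' Q := by
  intro Q
  induction Q generalizing V V' with
  | nil => rfl
  | cons e Q ih =>
    simp only [pvF]
    by_cases he : e.1 ∈ V
    · rw [if_pos he, if_pos ((h e.1).1 he), ih h]
    · rw [if_neg he, if_neg (fun hc => he ((h e.1).2 hc))]
      congr 1
      exact ih (by intro x; simp [h x])

lemma pvF_append (V : List String) (Q1 Q2 : List (String × List String × Int)) :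
    pvF V (Q1 ++ Q2) = pvF V Q1 ++ pvF (Q1.map Prod.fst ++ V) Q2 := by
  induction Q1 generalizing V with
  | nil => simp [pvF]
  | cons e Q1 ih =>
    simp only [List.cons_append, pvF, List.map_cons]
    by_cases he : e.1 ∈ V
    · rw [if_pos he, if_pos he, ih]
      congr 1
      refine pvF_congr (fun x => ?_) Q2
      simp only [List.mem_append, List.mem_cons]
      constructor
      · tauto
      · rintro (h | h)
        · subst h; right; exact he
        · tauto
    · rw [if_neg he, if_neg he, List.cons_append]
      congr 1
      rw [ih]
      congr 1
      refine pvF_congr (fun x => ?_) Q2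
      simp only [List.mem_append, List.mem_cons]
      tauto

lemma pvF_sub {V : List String} {Q : List (String × List String × Int)} {e} (h : e ∈ pvF V Q) : e ∈ Q := by
  induction Q generalizing V with
  | nil => simp [pvF] at h
  | cons f Q ih =>
    rw [pvF_cons] at h
    by_cases hf : f.1 ∈ V
    · rw [if_pos hf] at h; exact List.mem_cons_of_mem _ (ih h)
    · rw [if_neg hf] at h
      rcases List.mem_cons.1 h with h | h
      · simp [h]
      · exact List.mem_cons_of_mem _ (ih h)

lemma mem_pvF_iff {x : String} {V : List String} (Q : List (String × List String × Int)) (hx : x ∉ V) :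
    x ∈ (pvF V Q).map Prod.fst ↔ x ∈ Q.map Prod.fst := by
  induction Q generalizing V with
  | nil => simp [pvF]
  | cons e Q ih =>
    rw [pvF_cons]
    by_cases he : e.1 ∈ V
    · rw [if_pos he]
      have hne : x ≠ e.1 := fun h => hx (h ▸ he)
      simp only [List.map_cons, List.mem_cons]
      rw [ih hx]
      constructor
      · tauto
      · rintro (h | h)
        · exact absurd h hne
        · exact h
    · rw [if_neg he]
      by_cases hxe : x = e.1
      · simp [hxe]
      · have hx' : x ∉ e.1 :: V := by simp [hxe, hx]
        simp only [List.map_cons, List.mem_cons]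
        rw [ih hx']

lemma pvF_nil_of_mem {V : List String} {Q : List (String × List String × Int)}
    (h : ∀ e ∈ Q, e.1 ∈ V) : pvF V Q = [] := by
  induction Q with
  | nil => rfl
  | cons e Q ih =>
    rw [pvF_cons, if_pos (h e (by simp))]
    exact ih (fun f hf => h f (by simp [hf]))

lemma pvG_congr {W W' : List String} (h : ∀ x, x ∈ W ↔ x ∈ W') (p : List String) (w : Int) :
    ∀ l, pvG p w W l = pvG p w W' l := by
  intro l
  induction l generalizing W W' with
  | nil => rfl
  | cons cp l ih =>
    obtain ⟨c, pw⟩ := cp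
    simp only [pvG]
    by_cases hc : c ∈ W
    · rw [if_pos hc, if_pos ((h c).1 hc), ih h]
    · rw [if_neg hc, if_neg (fun hc' => hc ((h c).2 hc'))]
      congr 1
      exact ih (by intro x; simp [h x])

-- A's filterMap of fresh children, after pvF-dedup, is exactly pvG
lemma pvF_filterMap_pvG (p : List String) (w : Int) (cond : String → Bool) :
    ∀ (l : List (String × Int)) (W : List String), (∀ c, cond c = true → c ∈ W) →
    pvF W (l.filterMap (fun vp => if cond vp.1 then none else some (vp.1, p ++ [vp.1], w + vp.2)))
      = pvG p w W l := by
  intro l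
  induction l with
  | nil => intro W _; rfl
  | cons cp l ih =>
    intro W hW
    obtain ⟨c, pw⟩ := cp
    simp only [List.filterMap_cons, pvG]
    by_cases hc : cond c = true
    · rw [if_pos hc, if_pos (hW c hc)]
      exact ih W hW
    · rw [if_neg hc]
      by_cases hcW : c ∈ W
      · rw [pvF_cons, if_pos hcW, if_pos hcW]
        exact ih W hW
      · rw [pvF_cons, if_neg hcW, if_neg hcW]
        congr 1
        exact ih (c :: W) (fun c' hc' => by simp [hW c' hc'])

-- ---- counting helpers ----
lemma length_filter_point (u : List String) (hn : u.Nodup) (a : String) (ha : a ∈ u)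
    (P Q : String → Bool) (hPQ : ∀ x, Q x = true ↔ (P x = true ∧ x ≠ a)) (hPa : P a = true) :
    (u.filter Q).length + 1 = (u.filter P).length := by
  induction u with
  | nil => simp at ha
  | cons b u ih =>
    rcases List.mem_cons.1 ha with hb | hb
    · subst hb
      have hna : a ∉ u := (List.nodup_cons.1 hn).1
      have hQa : Q a = false := by
        rcases hq : Q a with _ | _
        · rfl
        · exact absurd ((hPQ a).1 hq).2 (by simp)
      have : u.filter Q = u.filter P := by
        apply List.filter_congr
        intro x hx
        have hxa : x ≠ a := fun h => hna (h ▸ hx)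
        rcases hp : P x with _ | _
        · rcases hq : Q x with _ | _
          · rfl
          · exact absurd ((hPQ x).1 hq).1 (by simp [hp])
        · exact ((hPQ x).2 ⟨hp, hxa⟩)
      simp [hQa, hPa, this]
    · have hn' : u.Nodup := (List.nodup_cons.1 hn).2
      have hba : b ≠ a := fun h => ((List.nodup_cons.1 hn).1 (h ▸ hb))
      have hQP : Q b = P b := by
        rcases hp : P b with _ | _
        · rcases hq : Q b with _ | _
          · rfl
          · exact absurd ((hPQ b).1 hq).1 (by simp [hp])
        · exact (hPQ b).2 ⟨hp, hba⟩
      rcases hp : P b with _ | _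
      · have hq : Q b = false := by rw [hQP, hp]
        simp only [List.filter_cons, hp, hq, Bool.false_eq_true, if_false]
        exact ih hn' hb
      · have hq : Q b = true := by rw [hQP, hp]
        simp only [List.filter_cons, hp, hq, if_true, List.length_cons]
        have := ih hn' hb
        omega

lemma nodup_subset_length_le {l u : List String} (hn : l.Nodup) (hs : ∀ x ∈ l, x ∈ u) :
    l.length ≤ u.length :=
  (List.subperm_of_subset hn hs).length_le

lemma sum_map_const_of {α : Type} (l : List α) (f : α → Nat) (c : Nat) (h : ∀ x ∈ l, f x = c) :
    (l.map f).sum = l.length * c := by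
  induction l with
  | nil => simp
  | cons x l ih =>
    simp only [List.map_cons, List.sum_cons, List.length_cons]
    rw [h x (by simp), ih (fun y hy => h y (by simp [hy]))]
    ring

-- membership of adjacency targets in pvNbrs
lemma pvAdj_fst_mem {grafo : List (String × List (String × Int))} {v : String} {vp : String × Int}
    (h : vp ∈ pvAdj grafo v) : vp.1 ∈ pvNbrs grafo := by
  rcases hf : grafo.find? (fun p => p.1 == v) with _ | p
  · have he : pvAdj grafo v = [] := by unfold pvAdj; rw [hf]
    rw [he] at h; simp at h
  · have he : pvAdj grafo v = p.2 := by unfold pvAdj; rw [hf]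
    rw [he] at h
    have hp : p ∈ grafo := List.mem_of_find?_eq_some hf
    unfold pvNbrs
    exact List.mem_flatMap.2 ⟨p, hp, List.mem_map.2 ⟨vp, h, rfl⟩⟩

lemma pvAdj_length_le (grafo : List (String × List (String × Int))) (v : String) :
    (pvAdj grafo v).length ≤ (grafo.map (fun p => p.2.length)).sum := by
  rcases hf : grafo.find? (fun p => p.1 == v) with _ | p
  · have he : pvAdj grafo v = [] := by unfold pvAdj; rw [hf]
    simp [he]
  · have he : pvAdj grafo v = p.2 := by unfold pvAdj; rw [hf]
    have hp : p ∈ grafo := List.mem_of_find?_eq_some hf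
    have hm : p.2.length ∈ (grafo.map (fun p => p.2.length)) := List.mem_map.2 ⟨p, hp, rfl⟩
    rw [he]
    exact List.le_sum_of_mem hm

-- ---- reconstruction lemmas ----
lemma buscaB_recon_insert {par : PySem.Dict String String} {k v : String} :
    ∀ (fr : Nat) (x : String) (L : List String), buscaB_recon par fr x = L → k ∉ L →
    buscaB_recon (par.insert k v) fr x = L := by
  intro fr
  induction fr with
  | zero => intro x L h _; simpa [buscaB_recon] using h
  | succ fr ih =>
    intro x L h hk
    simp only [buscaB_recon] at h ⊢
    subst h
    have hkx : x ≠ k := fun he => hk (by simp [he])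
    rw [PySem.Dict.get?_insert_of_ne par v hkx]
    rcases hg : par.get? x with _ | prev
    · simp [hg]
    · simp only [hg]
      have hk' : k ∉ buscaB_recon par fr prev := by
        intro hm
        apply hk
        rw [hg]
        exact List.mem_cons_of_mem _ hm
      congr 1
      exact ih prev _ rfl hk'

lemma items_length_insert_fresh {par : PySem.Dict String String} {k v : String}
    (h : par.contains k = false) : (par.insert k v).items.length = par.items.length + 1 := by
  rw [PySem.Dict.items_insert_of_not_contains par v h]
  simp

-- ---- measures ----
def pvCntA (grafo : List (String × List (String × Int))) (inicio : String) (vis : List String) : Nat :=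
  ((PySem.List.dedup (pvU grafo inicio)).filter (fun x => !(decide (x ∈ vis)))).length

def pvMuA (grafo : List (String × List (String × Int))) (inicio : String)
    (vis : List String) (fila : List (String × List String × Int)) : Nat :=
  pvCntA grafo inicio vis * (pvK grafo) ^ (pvN grafo inicio + 1)
    + ((fila.map (fun e => (pvK grafo) ^ (pvN grafo inicio + 1 - e.2.1.length))).sum)

def pvCntB (grafo : List (String × List (String × Int))) (dist : PySem.Dict String Int) : Nat :=
  ((PySem.List.dedup (pvNbrs grafo)).filter (fun c => !(dist.contains c))).length

def pvMuB (grafo : List (String × List (String × Int))) (dist : PySem.Dict String Int)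
    (filaB : List String) : Nat :=
  filaB.length + pvCntB grafo dist

-- ---- the simulation invariant ----
def pvInv (grafo : List (String × List (String × Int))) (inicio fim : String)
    (vis : List String) (fila : List (String × List String × Int))
    (par : PySem.Dict String String) (dist : PySem.Dict String Int) (filaB : List String) : Prop :=
  fim ∉ vis
  ∧ (∀ v ∈ vis, ∀ vp ∈ pvAdj grafo v, vp.1 ∈ vis ∨ vp.1 ∈ fila.map Prod.fst)
  ∧ (∀ e ∈ fila, e.2.1.getLast? = some e.1 ∧ e.2.1.Nodup ∧ (∀ x ∈ e.2.1.dropLast, x ∈ vis)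
       ∧ (∀ x ∈ e.2.1, x ∈ pvU grafo inicio))
  ∧ (∀ v ∈ vis, v ∈ pvU grafo inicio)
  ∧ (∀ x, dist.contains x = true ↔ (x ∈ vis ∨ x ∈ (pvF vis fila).map Prod.fst))
  ∧ filaB = (pvF vis fila).map Prod.fst
  ∧ (∀ e ∈ pvF vis fila, dist.get? e.1 = some e.2.2
       ∧ ∀ fr, par.items.length + 1 ≤ fr → buscaB_recon par fr e.1 = e.2.1.reverse)
  ∧ (∀ x, par.contains x = true → dist.contains x = true)

-- ---- the fold over one adjacency list (B side) matches pvG ----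
lemma foldB_spec (grafo : List (String × List (String × Int))) (atual : String)
    (p : List String) (w : Int) :
    ∀ (l : List (String × Int)) (W : List String) (par : PySem.Dict String String)
      (dist : PySem.Dict String Int) (acc : List String),
    (∀ x, dist.contains x = true ↔ x ∈ W) →
    dist.get? atual = some w →
    (∀ x ∈ p ++ [atual], dist.contains x = true) →
    (∀ x, par.contains x = true → dist.contains x = true) →
    (∀ fr, par.items.length + 1 ≤ fr → buscaB_recon par fr atual = p.reverse) →
    (∀ vp ∈ l, vp.1 ∈ pvNbrs grafo) →
    (l.foldl (buscaB_step atual) (par, dist, acc)).2.2 = acc ++ (pvG p w W l).map Prod.fst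
    ∧ (∀ x, (l.foldl (buscaB_step atual) (par, dist, acc)).2.1.contains x = true ↔
         (x ∈ W ∨ x ∈ (pvG p w W l).map Prod.fst))
    ∧ (∀ x, dist.contains x = true →
         (l.foldl (buscaB_step atual) (par, dist, acc)).2.1.get? x = dist.get? x)
    ∧ (∀ e ∈ pvG p w W l, (l.foldl (buscaB_step atual) (par, dist, acc)).2.1.get? e.1 = some e.2.2)
    ∧ (l.foldl (buscaB_step atual) (par, dist, acc)).1.items.length
        = par.items.length + (pvG p w W l).length
    ∧ (∀ (fr : Nat) (x : String) (L : List String), buscaB_recon par fr x = L →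
         (∀ y ∈ L, dist.contains y = true) →
         buscaB_recon (l.foldl (buscaB_step atual) (par, dist, acc)).1 fr x = L)
    ∧ (∀ e ∈ pvG p w W l, ∀ fr,
         (l.foldl (buscaB_step atual) (par, dist, acc)).1.items.length + 1 ≤ fr →
         buscaB_recon (l.foldl (buscaB_step atual) (par, dist, acc)).1 fr e.1 = e.2.1.reverse)
    ∧ (∀ x, (l.foldl (buscaB_step atual) (par, dist, acc)).1.contains x = true →
         (l.foldl (buscaB_step atual) (par, dist, acc)).2.1.contains x = true)
    ∧ (l.foldl (buscaB_step atual) (par, dist, acc)).2.2.length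
        + pvCntB grafo (l.foldl (buscaB_step atual) (par, dist, acc)).2.1
        = acc.length + pvCntB grafo dist := by
  intro l
  induction l with
  | nil =>
    intro W par dist acc hW hget hp hpar hrec hl
    refine ⟨by simp [pvG], ?_, ?_, ?_, ?_, ?_, ?_, ?_, ?_⟩
    · intro x; simpa [pvG] using hW x
    · intro x _; rfl
    · intro e he; simp [pvG] at he
    · simp [pvG]
    · intro fr x L h _; simpa using h
    · intro e he; simp [pvG] at he
    · intro x hx; exact hpar x hx
    · rfl
  | cons cp l ih =>
    intro W par dist acc hW hget hp hpar hrec hl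
    obtain ⟨c, pw⟩ := cp
    by_cases hc : dist.contains c = true
    · -- already discovered: both sides skip
      have hcW : c ∈ W := (hW c).1 hc
      have hstep : buscaB_step atual (par, dist, acc) (c, pw) = (par, dist, acc) := by
        simp [buscaB_step, hc]
      rw [pvG_cons, if_pos hcW]
      simp only [List.foldl_cons, hstep]
      exact ih W par dist acc hW hget hp hpar hrec (fun vp hvp => hl vp (by simp [hvp]))
    · -- fresh child: B inserts, pvG keeps
      have hcW : c ∉ W := fun hm => hc ((hW c).2 hm)
      have hgd : dist.getD atual 0 = w := by
        rw [PySem.Dict.getD_eq_get?_getD, hget]; rfl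
      have hcb : dist.contains c = false := by simpa using hc
      have hparc : par.contains c = false := by
        rcases hpc : par.contains c with _ | _
        · rfl
        · exact absurd (hpar c hpc) (by simp [hcb])
      have hstep : buscaB_step atual (par, dist, acc) (c, pw)
          = (par.insert c atual, dist.insert c (w + pw), acc ++ [c]) := by
        simp [buscaB_step, hc, hgd]
      have hcpa : c ∉ p ++ [atual] := by
        intro hm
        exact hc (hp c hm)
      have hcp : c ∉ p := fun hm => hcpa (by simp [hm])
      have hca : c ≠ atual := fun hm => hcpa (by simp [hm])
      set par' := par.insert c atual with hpar'
      set dist' := dist.insert c (w + pw) with hdist'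
      have hlen' : par'.items.length = par.items.length + 1 :=
        items_length_insert_fresh hparc
      -- hypotheses for the induction step
      have hW' : ∀ x, dist'.contains x = true ↔ x ∈ c :: W := by
        intro x
        rw [hdist', PySem.Dict.contains_insert]
        simp [hW x, or_comm]
      have hget' : dist'.get? atual = some w := by
        rw [hdist', PySem.Dict.get?_insert_of_ne dist (w + pw) (Ne.symm hca)]
        exact hget
      have hp' : ∀ x ∈ p ++ [atual], dist'.contains x = true := by
        intro x hx
        rw [hdist', PySem.Dict.contains_insert]
        simp [hp x hx]
      have hpar'' : ∀ x, par'.contains x = true → dist'.contains x = true := by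
        intro x hx
        rw [hpar', PySem.Dict.contains_insert] at hx
        rw [hdist', PySem.Dict.contains_insert]
        rcases (by simpa using hx : x = c ∨ par.contains x = true) with h | h
        · simp [h]
        · simp [hpar x h]
      have hcrev : c ∉ p.reverse := by simpa using hcp
      have hrec' : ∀ fr, par'.items.length + 1 ≤ fr → buscaB_recon par' fr atual = p.reverse := by
        intro fr hfr
        have h1 : buscaB_recon par fr atual = p.reverse := hrec fr (by omega)
        exact buscaB_recon_insert fr atual p.reverse h1 hcrev
      have hl' : ∀ vp ∈ l, vp.1 ∈ pvNbrs grafo := fun vp hvp => hl vp (by simp [hvp])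
      obtain ⟨C1, C2, C3, C4, C5, C6, C7, C8, C9⟩ :=
        ih (c :: W) par' dist' (acc ++ [c]) hW' hget' hp' hpar'' hrec' hl'
      rw [pvG_cons, if_neg hcW]
      simp only [List.foldl_cons, hstep]
      have hdists : ∀ x, dist.contains x = true → dist'.contains x = true := by
        intro x hx
        rw [hdist', PySem.Dict.contains_insert]
        simp [hx]
      have hget'' : ∀ x, dist.contains x = true → dist'.get? x = dist.get? x := by
        intro x hx
        have hne : x ≠ c := fun hxe => hc (hxe ▸ hx)
        rw [hdist', PySem.Dict.get?_insert_of_ne dist (w + pw) hne]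
      refine ⟨?_, ?_, ?_, ?_, ?_, ?_, ?_, ?_, ?_⟩
      · rw [C1]; simp
      · intro x
        rw [C2 x]
        simp only [List.map_cons, List.mem_cons]
        tauto
      · intro x hx
        rw [C3 x (hdists x hx)]
        exact hget'' x hx
      · intro e he
        rcases List.mem_cons.1 he with he | he
        · subst he
          have : dist'.get? c = some (w + pw) := by
            rw [hdist']; exact PySem.Dict.get?_insert_self dist c (w + pw)
          rw [C3 c (by rw [hdist']; exact PySem.Dict.contains_insert_self dist c (w + pw))]
          exact this
        · exact C4 e he
      · rw [C5, hlen']; simp; omega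
      · intro fr x L h hL
        have h1 : buscaB_recon par' fr x = L := by
          refine buscaB_recon_insert fr x L h ?_
          intro hm
          exact hc (hL c hm)
        exact C6 fr x L h1 (fun y hy => hdists y (hL y hy))
      · intro e he fr hfr
        rcases List.mem_cons.1 he with he | he
        · subst he
          -- e = (c, p ++ [c], w + pw); reconstruct c from par'
          have hGlen : par.items.length + 2 ≤ fr := by
            rw [C5, hlen'] at hfr
            omega
          rcases fr with _ | fr'
          · omega
          · have hrev : buscaB_recon par' fr' atual = p.reverse := by
              refine buscaB_recon_insert fr' atual p.reverse (hrec fr' (by omega)) hcrev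
            have hchain : buscaB_recon par' (fr' + 1) c = c :: p.reverse := by
              simp only [buscaB_recon]
              rw [hpar', PySem.Dict.get?_insert_self par c atual]
              rw [← hpar'] at *
              simp [hrev]
            have hmem : ∀ y ∈ c :: p.reverse, dist'.contains y = true := by
              intro y hy
              rcases List.mem_cons.1 hy with hy | hy
              · rw [hy, hdist']; exact PySem.Dict.contains_insert_self dist c (w + pw)
              · exact hdists y (hp y (by simp [List.mem_reverse.1 hy]))
            have := C6 (fr' + 1) c (c :: p.reverse) hchain hmem
            rw [this]
            simp
        · exact C7 e he fr hfr
      · exact C8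
      · rw [C9]
        have hcnb : c ∈ PySem.List.dedup (pvNbrs grafo) := by
          rw [PySem.List.mem_dedup]
          exact hl (c, pw) (by simp)
        have hpt := length_filter_point (PySem.List.dedup (pvNbrs grafo))
          (PySem.List.nodup_dedup _) c hcnb
          (fun x => !(dist.contains x)) (fun x => !(dist'.contains x))
          (by
            intro x
            simp only [hdist', PySem.Dict.contains_insert, Bool.not_eq_true', Bool.or_eq_false_iff,
              beq_eq_false_iff_ne]
            tauto)
          (by simp [hcb])
        unfold pvCntB
        simp only [List.length_append, List.length_cons, List.length_nil]
        omega

-- ---- path helpers ----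
lemma path_mem {p : List String} {a x : String} (hl : p.getLast? = some a) (hx : x ∈ p) :
    x ∈ p.dropLast ∨ x = a := by
  induction p with
  | nil => simp at hx
  | cons b q ih =>
    cases q with
    | nil =>
      simp at hl hx
      right; rw [hx, hl]
    | cons b' q' =>
      rw [List.getLast?_cons_cons] at hl
      rcases List.mem_cons.1 hx with hx | hx
      · left; rw [hx]; simp
      · rcases ih hl hx with h | h
        · left; simpa using Or.inr h
        · right; exact h

lemma mem_pvF_or (x : String) (V : List String) (Q : List (String × List String × Int)) :
    (x ∈ (pvF V Q).map Prod.fst ∨ x ∈ V) ↔ (x ∈ Q.map Prod.fst ∨ x ∈ V) := by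
  by_cases hx : x ∈ V
  · simp [hx]
  · simp only [hx, or_false]
    exact mem_pvF_iff Q hx

-- ---- the main simulation ----
set_option maxHeartbeats 2000000 in
lemma pvMain (grafo : List (String × List (String × Int))) (inicio fim : String) :
    ∀ (fa : Nat) (fb : Nat) (vis : PySem.Set String) (fila : List (String × List String × Int))
      (par : PySem.Dict String String) (dist : PySem.Dict String Int) (filaB : List String),
    pvInv grafo inicio fim vis fila par dist filaB →
    pvMuA grafo inicio vis fila < fa → pvMuB grafo dist filaB < fb →
    buscaA_loop grafo fim fa vis fila = buscaB_loop grafo fim fb par dist filaB := by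
  intro fa
  induction fa with
  | zero =>
    intro fb vis fila par dist filaB hInv hA hB
    omega
  | succ fa ih =>
    intro fb vis fila par dist filaB hInv hA hB
    obtain ⟨I1, I2, I3, I5, I4, I6, I7, I8⟩ := hInv
    rcases fila with _ | ⟨⟨a, pp, w⟩, rest⟩
    · -- queue empty: both return (none, none)
      have hfB : filaB = [] := by simpa [pvF] using I6
      subst hfB
      rcases fb with _ | fb
      · exact absurd hB (by omega)
      · simp [buscaA_loop, buscaB_loop]
    · have hga : pp.getLast? = some a := (I3 (a, pp, w) (by simp)).1
      have hnd : pp.Nodup := (I3 (a, pp, w) (by simp)).2.1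
      have hdl : ∀ x ∈ pp.dropLast, x ∈ vis := (I3 (a, pp, w) (by simp)).2.2.1
      have hppU : ∀ x ∈ pp, x ∈ pvU grafo inicio := (I3 (a, pp, w) (by simp)).2.2.2
      have hpv : ∀ x ∈ pp, x ∈ vis ∨ x = a := fun x hx =>
        (path_mem hga hx).elim (fun h => Or.inl (hdl x h)) Or.inr
      have happ : a ∈ pp := List.mem_of_getLast? hga
      have haU : a ∈ pvU grafo inicio := hppU a happ
      have hLN : pp.length ≤ pvN grafo inicio := by
        unfold pvN
        apply nodup_subset_length_le hnd
        intro x hx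
        rw [PySem.List.mem_dedup]
        exact hppU x hx
      have hK1 : 1 ≤ pvK grafo := by unfold pvK; omega
      have hqpos : 0 < (pvK grafo) ^ (pvN grafo inicio - pp.length) := pow_pos (by omega : 0 < pvK grafo) _
      have hexp : pvN grafo inicio + 1 - pp.length = (pvN grafo inicio - pp.length) + 1 := by omega
      by_cases ha : a ∈ vis
      · -- node already expanded once: A re-expands it, B's state does not move
        have hafim : ¬ a = fim := fun h => I1 (h ▸ ha)
        have hvis' : PySem.Set.add vis a = vis := PySem.Set.add_of_mem ha
        conv_lhs => rw [buscaA_loop]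
        simp only [hvis']
        rw [if_neg hafim]
        set novos := (pvAdj grafo a).filterMap (fun vp =>
          if PySem.Set.contains vis vp.1 then none
          else some (vp.1, pp ++ [vp.1], w + vp.2)) with hnv
        have hnshape : ∀ e ∈ novos,
            (∃ pc : Int, (e.1, pc) ∈ pvAdj grafo a ∧ e = (e.1, pp ++ [e.1], w + pc))
            ∧ e.1 ∉ vis := by
          intro e he
          rw [hnv, List.mem_filterMap] at he
          obtain ⟨vp, hvp, hfe⟩ := he
          split_ifs at hfe with hcv
          have hee : e = (vp.1, pp ++ [vp.1], w + vp.2) := (Option.some.inj hfe).symm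
          subst hee
          refine ⟨⟨vp.2, hvp, rfl⟩, ?_⟩
          intro hm
          exact hcv ((PySem.Set.contains_iff vis vp.1).2 hm)
        have hnrest : ∀ e ∈ novos, e.1 ∈ rest.map Prod.fst := by
          intro e he
          obtain ⟨⟨pc, hadj, _⟩, hnvis⟩ := hnshape e he
          rcases I2 a ha (e.1, pc) hadj with h | h
          · exact absurd h hnvis
          · rw [List.map_cons] at h
            rcases List.mem_cons.1 h with h' | h'
            · exact absurd (h' ▸ ha) hnvis
            · exact h'
        have habs : pvF vis (rest ++ novos) = pvF vis rest := by
          rw [pvF_append]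
          have h0 : pvF (rest.map Prod.fst ++ vis) novos = [] :=
            pvF_nil_of_mem (fun e he => List.mem_append.2 (Or.inl (hnrest e he)))
          simp [h0]
        have hpvf : pvF vis ((a, pp, w) :: rest) = pvF vis rest := by
          rw [pvF_cons]; simp [ha]
        -- arithmetic: the measure of A strictly decreases
        have hnlen : novos.length + 1 ≤ pvK grafo := by
          have h1 : novos.length ≤ (pvAdj grafo a).length := by
            rw [hnv]; exact List.length_filterMap_le _ _
          have h2 := pvAdj_length_le grafo a
          unfold pvK
          omega
        have hshape_len : ∀ e ∈ novos,
            (pvK grafo) ^ (pvN grafo inicio + 1 - e.2.1.length)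
              = (pvK grafo) ^ (pvN grafo inicio - pp.length) := by
          intro e he
          obtain ⟨⟨pc, _, hee⟩, _⟩ := hnshape e he
          rw [hee]
          have hlen : ((e.1, pp ++ [e.1], w + pc) : String × List String × Int).2.1.length
              = pp.length + 1 := by simp
          rw [hlen]
          congr 1
          omega
        have hsum : (novos.map (fun e => (pvK grafo) ^ (pvN grafo inicio + 1 - e.2.1.length))).sum
            = novos.length * (pvK grafo) ^ (pvN grafo inicio - pp.length) :=
          sum_map_const_of _ _ _ hshape_len
        have hlt : novos.length * (pvK grafo) ^ (pvN grafo inicio - pp.length)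
            < (pvK grafo) ^ (pvN grafo inicio + 1 - pp.length) := by
          rw [hexp, pow_succ]
          calc novos.length * (pvK grafo) ^ (pvN grafo inicio - pp.length)
              < pvK grafo * (pvK grafo) ^ (pvN grafo inicio - pp.length) :=
                mul_lt_mul_of_pos_right (by omega) hqpos
            _ = (pvK grafo) ^ (pvN grafo inicio - pp.length) * pvK grafo := Nat.mul_comm _ _
        have hAexp : pvMuA grafo inicio vis (rest ++ novos)
            < pvMuA grafo inicio vis ((a, pp, w) :: rest) := by
          unfold pvMuA
          rw [List.map_append, List.sum_append, hsum, List.map_cons, List.sum_cons]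
          dsimp only
          omega
        refine ih fb vis (rest ++ novos) par dist filaB
          ⟨I1, ?_, ?_, I5, ?_, ?_, ?_, I8⟩ (by omega) hB
        · intro v hv vp hvp
          rcases I2 v hv vp hvp with h | h
          · exact Or.inl h
          · rw [List.map_cons] at h
            rcases List.mem_cons.1 h with h' | h'
            · exact Or.inl (h' ▸ ha)
            · right
              rw [List.map_append]
              exact List.mem_append.2 (Or.inl h')
        · intro e he
          rcases List.mem_append.1 he with he | he
          · exact I3 e (by simp [he])
          · obtain ⟨⟨pc, hadj, hee⟩, hnvis⟩ := hnshape e he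
            have hcnp : e.1 ∉ pp := fun hm => hnvis ((hpv e.1 hm).elim id (fun h => h ▸ ha))
            rw [hee]
            refine ⟨by simp, ?_, ?_, ?_⟩
            · refine hnd.append (List.nodup_singleton _) ?_
              intro x hx hy
              have hxe : x = e.1 := by simpa using hy
              exact hcnp (hxe ▸ hx)
            · intro x hx
              rw [List.dropLast_concat] at hx
              rcases hpv x hx with h | h
              · exact h
              · exact h ▸ ha
            · intro x hx
              rcases List.mem_append.1 hx with h | h
              · exact hppU x h
              · have hxe : x = e.1 := by simpa using h
                rw [hxe]
                exact List.mem_cons_of_mem _ (pvAdj_fst_mem hadj)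
        · intro x
          rw [habs, ← hpvf]
          exact I4 x
        · rw [habs, ← hpvf]
          exact I6
        · intro e he
          rw [habs] at he
          exact I7 e (by rw [hpvf]; exact he)
      · -- fresh node
        have hvis' : PySem.Set.add vis a = vis ++ [a] := PySem.Set.add_of_not_mem ha
        have hpvf : pvF vis ((a, pp, w) :: rest) = (a, pp, w) :: pvF (a :: vis) rest := by
          rw [pvF_cons]; simp [ha]
        have hfB : filaB = a :: (pvF (a :: vis) rest).map Prod.fst := by
          rw [I6, hpvf]; simp
        have hhead : (a, pp, w) ∈ pvF vis ((a, pp, w) :: rest) := by rw [hpvf]; simp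
        have hda : dist.get? a = some w := (I7 (a, pp, w) hhead).1
        have hra : ∀ fr, par.items.length + 1 ≤ fr → buscaB_recon par fr a = pp.reverse :=
          (I7 (a, pp, w) hhead).2
        rcases fb with _ | fb
        · exact absurd hB (by omega)
        subst hfB
        by_cases hfim : a = fim
        · -- target found: both return the path and its weight
          subst hfim
          conv_lhs => rw [buscaA_loop]
          conv_rhs => rw [buscaB_loop]
          simp only [if_true]
          rw [hra (par.items.length + 1) le_rfl, List.reverse_reverse,
            PySem.Dict.getD_eq_get?_getD, hda]
          rfl
        · conv_lhs => rw [buscaA_loop]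
          conv_rhs => rw [buscaB_loop]
          simp only [if_neg hfim]
          rw [hvis']
          set restB := (pvF (a :: vis) rest).map Prod.fst with hrB
          set l := pvAdj grafo a with hladj
          set W := vis ++ a :: (pvF (a :: vis) rest).map Prod.fst with hWdef
          have hW : ∀ x, dist.contains x = true ↔ x ∈ W := by
            intro x
            rw [I4 x, hpvf, hWdef]
            simp only [List.map_cons, List.mem_cons, List.mem_append]
          have hp' : ∀ x ∈ pp ++ [a], dist.contains x = true := by
            intro x hx
            rw [I4 x]
            rcases List.mem_append.1 hx with h | h
            · rcases hpv x h with h' | h'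
              · exact Or.inl h'
              · right; rw [h', hpvf]; simp
            · right
              have hxa : x = a := by simpa using h
              rw [hxa, hpvf]; simp
          have hlnb : ∀ vp ∈ l, vp.1 ∈ pvNbrs grafo := fun vp hvp => pvAdj_fst_mem hvp
          obtain ⟨C1, C2, C3, C4, C5, C6, C7, C8, C9⟩ :=
            foldB_spec grafo a pp w l W par dist restB hW hda hp' I8 hra hlnb
          set novos := l.filterMap (fun vp =>
            if PySem.Set.contains (vis ++ [a]) vp.1 then none
            else some (vp.1, pp ++ [vp.1], w + vp.2)) with hnv
          have hnshape : ∀ e ∈ novos,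
              (∃ pc : Int, (e.1, pc) ∈ l ∧ e = (e.1, pp ++ [e.1], w + pc))
              ∧ e.1 ∉ vis ++ [a] := by
            intro e he
            rw [hnv, List.mem_filterMap] at he
            obtain ⟨vp, hvp, hfe⟩ := he
            split_ifs at hfe with hcv
            have hee : e = (vp.1, pp ++ [vp.1], w + vp.2) := (Option.some.inj hfe).symm
            subst hee
            refine ⟨⟨vp.2, hvp, rfl⟩, ?_⟩
            intro hm
            exact hcv ((PySem.Set.contains_iff _ vp.1).2 hm)
          have hWW : ∀ x, x ∈ rest.map Prod.fst ++ (vis ++ [a]) ↔ x ∈ W := by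
            intro x
            have h0 := mem_pvF_or x (a :: vis) rest
            rw [hWdef]
            simp only [List.mem_append, List.mem_cons, List.mem_singleton] at h0 ⊢
            tauto
          have hG : pvF (vis ++ [a]) (rest ++ novos) = pvF (a :: vis) rest ++ pvG pp w W l := by
            have h2 : pvF (rest.map Prod.fst ++ (vis ++ [a])) novos = pvG pp w W l := by
              rw [hnv]
              exact (pvF_filterMap_pvG pp w (fun c => PySem.Set.contains (vis ++ [a]) c) l
                (rest.map Prod.fst ++ (vis ++ [a]))
                (fun c hc => List.mem_append.2 (Or.inr ((PySem.Set.contains_iff _ c).1 hc)))).trans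
                (pvG_congr hWW pp w l)
            rw [pvF_append, h2]
            congr 1
            refine pvF_congr (fun x => ?_) rest
            simp only [List.mem_append, List.mem_cons, List.mem_singleton]
            tauto
          -- measure bookkeeping
          have hcnt : pvCntA grafo inicio (vis ++ [a]) + 1 = pvCntA grafo inicio vis := by
            unfold pvCntA
            refine length_filter_point _ (PySem.List.nodup_dedup _) a
              (by rw [PySem.List.mem_dedup]; exact haU)
              (fun x => !(decide (x ∈ vis))) (fun x => !(decide (x ∈ vis ++ [a]))) ?_ (by simp [ha])
            intro x
            simp only [Bool.not_eq_true', decide_eq_false_iff_not, List.mem_append,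
              List.mem_singleton]
            tauto
          have hnlen : novos.length + 1 ≤ pvK grafo := by
            have h1 : novos.length ≤ l.length := by
              rw [hnv]; exact List.length_filterMap_le _ _
            have h2 := pvAdj_length_le grafo a
            rw [← hladj] at h2
            unfold pvK
            omega
          have hshape_len : ∀ e ∈ novos,
              (pvK grafo) ^ (pvN grafo inicio + 1 - e.2.1.length)
                = (pvK grafo) ^ (pvN grafo inicio - pp.length) := by
            intro e he
            obtain ⟨⟨pc, _, hee⟩, _⟩ := hnshape e he
            rw [hee]
            have hlen : ((e.1, pp ++ [e.1], w + pc) : String × List String × Int).2.1.length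
                = pp.length + 1 := by simp
            rw [hlen]
            congr 1
            omega
          have hsum : (novos.map (fun e => (pvK grafo) ^ (pvN grafo inicio + 1 - e.2.1.length))).sum
              = novos.length * (pvK grafo) ^ (pvN grafo inicio - pp.length) :=
            sum_map_const_of _ _ _ hshape_len
          have hlt : novos.length * (pvK grafo) ^ (pvN grafo inicio - pp.length)
              < (pvK grafo) ^ (pvN grafo inicio + 1 - pp.length) := by
            rw [hexp, pow_succ]
            calc novos.length * (pvK grafo) ^ (pvN grafo inicio - pp.length)
                < pvK grafo * (pvK grafo) ^ (pvN grafo inicio - pp.length) :=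
                  mul_lt_mul_of_pos_right (by omega) hqpos
              _ = (pvK grafo) ^ (pvN grafo inicio - pp.length) * pvK grafo := Nat.mul_comm _ _
          have hmul : pvCntA grafo inicio vis * (pvK grafo) ^ (pvN grafo inicio + 1)
              = pvCntA grafo inicio (vis ++ [a]) * (pvK grafo) ^ (pvN grafo inicio + 1)
                + (pvK grafo) ^ (pvN grafo inicio + 1) := by
            rw [← hcnt]; ring
          have hAexp : pvMuA grafo inicio (vis ++ [a]) (rest ++ novos) < fa := by
            unfold pvMuA at hA ⊢
            rw [List.map_cons, List.sum_cons] at hA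
            rw [List.map_append, List.sum_append, hsum]
            dsimp only at hA ⊢
            omega
          refine ih fb (vis ++ [a]) (rest ++ novos) _ _ _
            ⟨?_, ?_, ?_, ?_, ?_, ?_, ?_, C8⟩ hAexp ?_
          · -- fim not yet visited
            intro hm
            rcases List.mem_append.1 hm with h | h
            · exact I1 h
            · have hfa : fim = a := by simpa using h
              exact hfim hfa.symm
          · -- every neighbour of a visited node is visited or queued
            intro v hv vp hvp
            rcases List.mem_append.1 hv with hv | hv
            · rcases I2 v hv vp hvp with h | h
              · exact Or.inl (List.mem_append.2 (Or.inl h))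
              · rw [List.map_cons] at h
                rcases List.mem_cons.1 h with h' | h'
                · exact Or.inl (List.mem_append.2 (Or.inr (by simp [h'])))
                · right
                  rw [List.map_append]
                  exact List.mem_append.2 (Or.inl h')
            · have hva : v = a := by simpa using hv
              by_cases hcv : vp.1 ∈ vis ++ [a]
              · exact Or.inl hcv
              · right
                rw [List.map_append]
                refine List.mem_append.2 (Or.inr ?_)
                rw [hnv]
                refine List.mem_map.2 ⟨(vp.1, pp ++ [vp.1], w + vp.2), ?_, rfl⟩
                refine List.mem_filterMap.2 ⟨vp, by rw [hladj, ← hva]; exact hvp, ?_⟩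
                have hcf : PySem.Set.contains (vis ++ [a]) vp.1 = false := by
                  rcases hcb : PySem.Set.contains (vis ++ [a]) vp.1 with _ | _
                  · rfl
                  · exact absurd ((PySem.Set.contains_iff _ vp.1).1 hcb) hcv
                simp [hcf]
                exact ⟨fun hm => hcv (List.mem_append.2 (Or.inl hm)),
                  fun hm => hcv (List.mem_append.2 (Or.inr (by simp [hm])))⟩
          · -- queued paths are well formed
            intro e he
            rcases List.mem_append.1 he with he | he
            · obtain ⟨h1, h2, h3, h4⟩ := I3 e (by simp [he])
              exact ⟨h1, h2, fun x hx => List.mem_append.2 (Or.inl (h3 x hx)), h4⟩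
            · obtain ⟨⟨pc, hadj, hee⟩, hnvis⟩ := hnshape e he
              have hcnp : e.1 ∉ pp := by
                intro hm
                exact hnvis (List.mem_append.2 ((hpv e.1 hm).elim Or.inl (fun h => Or.inr (by simp [h]))))
              rw [hee]
              refine ⟨by simp, ?_, ?_, ?_⟩
              · refine hnd.append (List.nodup_singleton _) ?_
                intro x hx hy
                have hxe : x = e.1 := by simpa using hy
                exact hcnp (hxe ▸ hx)
              · intro x hx
                rw [List.dropLast_concat] at hx
                rcases hpv x hx with h | h
                · exact List.mem_append.2 (Or.inl h)
                · exact List.mem_append.2 (Or.inr (by simp [h]))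
              · intro x hx
                rcases List.mem_append.1 hx with h | h
                · exact hppU x h
                · have hxe : x = e.1 := by simpa using h
                  rw [hxe]
                  exact List.mem_cons_of_mem _ (pvAdj_fst_mem hadj)
          · -- visited nodes live in the universe
            intro v hv
            rcases List.mem_append.1 hv with h | h
            · exact I5 v h
            · exact (by simpa using h : v = a) ▸ haU
          · -- dist keys = visited + queued (dedup view)
            intro x
            rw [C2 x, hG, List.map_append, hWdef]
            simp only [List.mem_append, List.mem_cons, List.mem_singleton]
            tauto
          · -- B's queue is the dedup view of A's queue
            rw [C1, hG, List.map_append, hrB]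
          · -- stored weight and parent chain are correct for every queued node
            intro e he
            rw [hG] at he
            rcases List.mem_append.1 he with he | he
            · have heold : e ∈ pvF vis ((a, pp, w) :: rest) := by
                rw [hpvf]; exact List.mem_cons_of_mem _ he
              obtain ⟨hde, hre⟩ := I7 e heold
              have hcont : dist.contains e.1 = true := by
                rw [I4 e.1]
                right
                exact List.mem_map.2 ⟨e, heold, rfl⟩
              obtain ⟨hge, hnde, hdle, hUe⟩ := I3 e (pvF_sub heold)
              have hLmem : ∀ y ∈ e.2.1.reverse, dist.contains y = true := by
                intro y hy
                have hy' : y ∈ e.2.1 := List.mem_reverse.1 hy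
                rcases path_mem hge hy' with h | h
                · rw [I4 y]; exact Or.inl (hdle y h)
                · rw [I4 y]
                  right
                  rw [h]
                  exact List.mem_map.2 ⟨e, heold, rfl⟩
              constructor
              · rw [C3 e.1 hcont]; exact hde
              · intro fr hfr
                have hfr' : par.items.length + 1 ≤ fr := by
                  rw [C5] at hfr; omega
                exact C6 fr e.1 e.2.1.reverse (hre fr hfr') hLmem
            · exact ⟨C4 e he, C7 e he⟩
          · -- B's measure decreased by one
            unfold pvMuB at hB ⊢
            simp only [List.length_cons] at hB
            omega


-- the initial states of the two loops are related, and the fuels exceed the measures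
theorem busca_peso_spec : Claim_equal_busca_peso := by
  unfold Claim_equal_busca_peso Spec_busca_peso
  intro grafo inicio fim _
  unfold busca_peso busca_peso_alt
  apply pvMain grafo inicio fim
  · refine ⟨?_, ?_, ?_, ?_, ?_, ?_, ?_, ?_⟩
    · intro h
      simp [PySem.Set.empty] at h
    · intro v hv
      simp [PySem.Set.empty] at hv
    · intro e he
      have hee : e = (inicio, [inicio], (0 : Int)) := by simpa using he
      subst hee
      refine ⟨by simp, by simp, by simp, ?_⟩
      intro x hx
      have hxi : x = inicio := by simpa using hx
      rw [hxi]
      exact List.mem_cons_self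
    · intro v hv
      simp [PySem.Set.empty] at hv
    · intro x
      rw [PySem.Dict.contains_insert]
      simp [PySem.Dict.contains_empty, pvF]
    · simp [pvF]
    · intro e he
      have hee : e = (inicio, [inicio], (0 : Int)) := by simpa [pvF] using he
      subst hee
      refine ⟨PySem.Dict.get?_insert_self _ _ _, ?_⟩
      intro fr hfr
      rcases fr with _ | fr
      · omega
      · simp [buscaB_recon, PySem.Dict.get?_empty]
    · intro x hx
      rw [PySem.Dict.contains_empty] at hx
      exact absurd hx (by simp)
  · -- A's fuel exceeds A's initial measure
    have hK1 : 1 ≤ pvK grafo := by unfold pvK; omega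
    have hcnt0 : pvCntA grafo inicio PySem.Set.empty = pvN grafo inicio := by
      unfold pvCntA pvN
      simp [PySem.Set.empty]
    have hpow : pvK grafo ^ pvN grafo inicio ≤ pvK grafo ^ (pvN grafo inicio + 1) :=
      Nat.pow_le_pow_right hK1 (by omega)
    have hmul : (pvN grafo inicio + 1) * pvK grafo ^ (pvN grafo inicio + 1)
        = pvN grafo inicio * pvK grafo ^ (pvN grafo inicio + 1)
          + pvK grafo ^ (pvN grafo inicio + 1) := by ring
    unfold pvMuA pvFuelA
    rw [hcnt0]
    simp only [List.map_cons, List.map_nil, List.sum_cons, List.sum_nil,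
      List.length_cons, List.length_nil, Nat.zero_add, Nat.add_sub_cancel]
    omega
  · -- B's fuel exceeds B's initial measure
    have h1 : pvCntB grafo (PySem.Dict.empty.insert inicio 0)
        ≤ (PySem.List.dedup (pvNbrs grafo)).length := by
      unfold pvCntB
      exact List.length_filter_le _ _
    have h2 : (PySem.List.dedup (pvNbrs grafo)).length ≤ (pvNbrs grafo).length :=
      nodup_subset_length_le (PySem.List.nodup_dedup _)
        (fun x hx => (PySem.List.mem_dedup _ x).1 hx)
    have h3 : (pvNbrs grafo).length = (grafo.map (fun p => p.2.length)).sum := by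
      unfold pvNbrs
      rw [List.length_flatMap]
      simp
    unfold pvMuB pvFuelB
    simp only [List.length_cons, List.length_nil]
    omega
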